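-- pv_equiv track=rewrite | github.com/Renee751/Data_Analytics_Python_Github | Module2-Functions-loops-conditionals/for/main.py | most_vowels
-- ===== SOURCE A (Python) =====
-- def most_vowels(countries):
--     # Functie om het aantal klinkers in een landnaam te tellen
--     def count_vowels_countries(country):
--         vowels = ['a', 'e', 'i', 'o', 'u']
--         count = 0
--         for letter in country.lower():
--             if letter in vowels:
--                 count += 1
--         return count
--     # Sorteer de landen op basis van het aantal klinkers in hun naam (in aflopende volgorde)
--     sorted_countries = sorted(countries, key=lambda x:count_vowels_countries(x), reverse= True)
--     # Retourneer de top drie landen met de meeste klinkers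
--
--     return sorted_countries[:3]
-- ===== SOURCE B (Python) =====
-- def most_vowels(countries):
--     # One-pass bounded selection: maintain only the current top-3 (count, name)
--     # pairs in descending, stable order instead of sorting the whole list.
--     def count_vowels_countries(country):
--         vowels = ['a', 'e', 'i', 'o', 'u']
--         count = 0
--         for letter in country.lower():
--             if letter in vowels:
--                 count += 1
--         return count
--     top = []  # at most 3 pairs (count, name), counts non-increasing, ties in input order
--     for name in countries:
--         c = count_vowels_countries(name)
--         if len(top) < 3 or c > top[-1][0]:
--             i = 0
--             while i < len(top) and top[i][0] >= c:
--                 i += 1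
--             top.insert(i, (c, name))
--             del top[3:]
--     return [name for _, name in top]
-- ===== Notes on version B (the rewrite author's own statement) =====
-- stated objective: alternative
-- what changed: B replaces the full descending sort plus [:3] slice by a single pass that maintains only the current top-3 (count, name) pairs in stable descending order via bounded insertion, with the same tie-breaking as the stable sort.
import Mathlib
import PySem

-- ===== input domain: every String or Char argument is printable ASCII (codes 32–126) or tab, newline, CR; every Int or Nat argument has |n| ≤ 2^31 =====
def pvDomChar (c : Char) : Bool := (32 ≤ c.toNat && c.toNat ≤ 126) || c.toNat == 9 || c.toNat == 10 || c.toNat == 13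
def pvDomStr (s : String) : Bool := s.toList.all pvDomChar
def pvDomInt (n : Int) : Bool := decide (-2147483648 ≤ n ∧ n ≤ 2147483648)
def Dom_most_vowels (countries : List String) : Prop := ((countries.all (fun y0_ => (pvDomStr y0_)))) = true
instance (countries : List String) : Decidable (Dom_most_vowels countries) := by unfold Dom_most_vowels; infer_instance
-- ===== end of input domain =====

-- B replaces "sort everything descending, then take 3" by a single pass that maintains
-- only the current top-3 (count, name) pairs in stable descending order (objective: alternative).


-- ===== PORT A =====
-- inner helper count_vowels_countries of A
def countVowelsA (country : String) : Int :=
  (PySem.Chars.lower country.toList).foldl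
    (fun count letter => if ['a', 'e', 'i', 'o', 'u'].contains letter then count + 1 else count) 0

def most_vowels (countries : List String) : List String :=
  let sorted_countries := PySem.List.sorted countries (fun x => countVowelsA x) true
  PySem.List.slice sorted_countries none (some 3)

-- ===== PORT B =====
-- inner helper count_vowels_countries of B (same code as in A's source)
def countVowelsB (country : String) : Int :=
  (PySem.Chars.lower country.toList).foldl
    (fun count letter => if ['a', 'e', 'i', 'o', 'u'].contains letter then count + 1 else count) 0

-- 'while i < len(top) and top[i][0] >= c: i += 1; top.insert(i, (c, name))'
def insertTop (c : Int) (name : String) : List (Int × String) → List (Int × String)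
  | [] => [(c, name)]
  | p :: rest => if c ≤ p.1 then p :: insertTop c name rest else (c, name) :: p :: rest

-- one iteration of B's for-loop ('del top[3:]' is the take 3)
def stepTop (top : List (Int × String)) (name : String) : List (Int × String) :=
  let c := countVowelsB name
  if top.length < 3 || decide ((top.getLastD (0, "")).1 < c) then (insertTop c name top).take 3
  else top

def most_vowels_alt (countries : List String) : List String :=
  (countries.foldl stepTop []).map (fun p => p.2)

-- ===== PRECONDITION & SPEC =====
def Spec_most_vowels (countries : List String) (out : List String) : Prop := out = most_vowels_alt countries
instance (countries : List String) (out : List String) : Decidable (Spec_most_vowels countries out) := by unfold Spec_most_vowels; infer_instance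

-- ===== CLAIM (what is proved, stated in full; the proofs are below) =====
def Claim_equal_most_vowels : Prop := ∀ (countries : List String), Dom_most_vowels countries → Spec_most_vowels countries (most_vowels countries)

-- ===== LEMMAS AND PROOFS =====

theorem countVowelsB_eq : countVowelsB = countVowelsA := rfl

-- one step of B's loop = insert-and-truncate on the sorted list's first three elements
theorem step_take3 (S : List String)
    (hS : S.Pairwise (fun a b => countVowelsA b ≤ countVowelsA a)) (x : String) :
    stepTop ((S.take 3).map (fun s => (countVowelsA s, s))) x
      = ((PySem.List.insertBy (fun a b => decide (countVowelsA b < countVowelsA a)) x S).take 3).map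
          (fun s => (countVowelsA s, s)) := by
  match S, hS with
  | [], _ => simp [stepTop, insertTop, PySem.List.insertBy, countVowelsB_eq]
  | [a], _ =>
    simp [stepTop, insertTop, PySem.List.insertBy, countVowelsB_eq]
    split_ifs <;> first | rfl | (exfalso; omega)
  | [a, b], _ =>
    simp [stepTop, insertTop, PySem.List.insertBy, countVowelsB_eq]
    split_ifs <;> first | rfl | (exfalso; omega)
  | a :: b :: c :: rest, hS =>
    rw [List.pairwise_cons] at hS
    obtain ⟨h1, hS⟩ := hS
    rw [List.pairwise_cons] at hS
    obtain ⟨h2, _⟩ := hS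
    have hba : countVowelsA b ≤ countVowelsA a := h1 b (by simp)
    have hca : countVowelsA c ≤ countVowelsA a := h1 c (by simp)
    have hcb : countVowelsA c ≤ countVowelsA b := h2 c (by simp)
    simp [stepTop, insertTop, PySem.List.insertBy, countVowelsB_eq]
    split_ifs <;> first | rfl | (exfalso; omega)

-- loop invariant: after processing a prefix, B's buffer is the first three of the
-- descending-sorted prefix, paired with their counts
theorem foldl_stepTop_eq (countries : List String) :
    countries.foldl stepTop []
      = ((PySem.List.sorted countries (fun x => countVowelsA x) true).take 3).map
          (fun s => (countVowelsA s, s)) := by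
  induction countries using List.reverseRecOn with
  | nil => rfl
  | append_singleton xs x ih =>
    have hsx : PySem.List.sorted (xs ++ [x]) (fun s => countVowelsA s) true
        = PySem.List.insertBy (fun a b => decide (countVowelsA b < countVowelsA a)) x
            (PySem.List.sorted xs (fun s => countVowelsA s) true) := by
      rw [PySem.List.sorted_rev_eq_foldl_insertBy (xs ++ [x]), List.foldl_append,
        List.foldl_cons, List.foldl_nil, ← PySem.List.sorted_rev_eq_foldl_insertBy]
    rw [List.foldl_append, List.foldl_cons, List.foldl_nil, ih, hsx]
    exact step_take3 _ (PySem.List.sorted_pairwise_rev xs _) x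

-- ===== VERDICT (by name: the statement is the Claim_ definition above) =====
theorem most_vowels_spec : Claim_equal_most_vowels := by
  intro countries _
  unfold Spec_most_vowels most_vowels most_vowels_alt
  rw [foldl_stepTop_eq, List.map_map]
  have h3 : (3 : Int) = ((3 : Nat) : Int) := rfl
  rw [h3, PySem.List.slice_to_natCast]
  simp [Function.comp_def]
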